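-- pv_equiv track=rewrite | github.com/edwardttz/NDSC | modelTrainer.py | trainBagOfWordsModel
-- ===== SOURCE A (Python) =====
-- def trainBagOfWordsModel(str_combi, x, model_dict, cat_num, STOP_WORDS):
-- 	if(x >= len(str_combi)):
-- 		return model_dict
-- 	else:
-- 		word = str_combi[x]
-- 		# Ignoring all stopwords and numbers only from the model
-- 		if(not word in STOP_WORDS and not word.isdigit()):
-- 			if(word in model_dict[cat_num]):
-- 				model_dict[cat_num][word] += 1
-- 			else:
-- 				model_dict[cat_num][word] = 1
-- 		return trainBagOfWordsModel(str_combi, x+1, model_dict, cat_num, STOP_WORDS)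
-- ===== SOURCE B (Python) =====
-- def trainBagOfWordsModel(str_combi, x, model_dict, cat_num, STOP_WORDS):
--     for i in range(x, len(str_combi)):
--         word = str_combi[i]
--         if word not in STOP_WORDS and not word.isdigit():
--             counts = model_dict[cat_num]
--             counts[word] = counts.get(word, 0) + 1
--     return model_dict
-- ===== Notes on version B (the rewrite author's own statement) =====
-- stated objective: idiomatic
-- what changed: Replaced A's tail recursion on the index (one Python call frame per word, recursion-limit bound) by a single iterative for-loop over range(x, len(str_combi)) with a dict.get-based increment.
import Mathlib
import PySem

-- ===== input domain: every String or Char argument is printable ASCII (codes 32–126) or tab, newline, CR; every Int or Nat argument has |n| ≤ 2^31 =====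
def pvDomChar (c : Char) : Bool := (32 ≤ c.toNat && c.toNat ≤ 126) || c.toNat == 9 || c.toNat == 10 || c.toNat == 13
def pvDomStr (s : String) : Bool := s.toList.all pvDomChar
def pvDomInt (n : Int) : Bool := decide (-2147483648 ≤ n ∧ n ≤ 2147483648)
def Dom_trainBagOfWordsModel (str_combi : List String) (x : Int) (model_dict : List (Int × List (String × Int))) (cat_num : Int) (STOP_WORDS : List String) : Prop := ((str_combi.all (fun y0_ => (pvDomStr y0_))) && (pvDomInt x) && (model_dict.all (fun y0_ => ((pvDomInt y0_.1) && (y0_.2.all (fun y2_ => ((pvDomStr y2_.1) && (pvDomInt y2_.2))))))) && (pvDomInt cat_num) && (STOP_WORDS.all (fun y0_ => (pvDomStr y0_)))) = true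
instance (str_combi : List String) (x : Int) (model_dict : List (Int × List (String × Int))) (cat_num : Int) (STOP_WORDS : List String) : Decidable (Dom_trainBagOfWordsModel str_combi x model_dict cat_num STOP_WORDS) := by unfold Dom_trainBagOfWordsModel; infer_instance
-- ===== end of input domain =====

-- B replaces A's tail recursion on the index by a single iterative pass (a fold over range(x, len));
-- same guard and same counting. Both A and B mutate model_dict in place and return the same object.
-- ===== PORT A =====
def trainBagOfWordsModel (str_combi : List String) (x : Int) (model_dict : List (Int × List (String × Int))) (cat_num : Int) (STOP_WORDS : List String) : List (Int × List (String × Int)) :=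
  if (str_combi.length : Int) ≤ x then model_dict
  else
    match PySem.List.pyGet? str_combi x with
    | none => model_dict   -- IndexError in Python (excluded by Pre_)
    | some word =>
      if ¬ (word ∈ STOP_WORDS) ∧ PySem.Str.strIsdigit word = false then
        match (PySem.Dict.mk model_dict).get? cat_num with
        | none => model_dict   -- KeyError in Python (excluded by Pre_)
        | some inner =>
          let innerD := PySem.Dict.mk inner
          let inner' := if innerD.contains word then innerD.modify word 0 (· + 1) else innerD.insert word 1
          trainBagOfWordsModel str_combi (x + 1) (((PySem.Dict.mk model_dict).insert cat_num inner'.items).items) cat_num STOP_WORDS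
      else
        trainBagOfWordsModel str_combi (x + 1) model_dict cat_num STOP_WORDS
termination_by ((str_combi.length : Int) - x).toNat
decreasing_by all_goals { simp only [not_le] at *; omega }

-- ===== PORT B =====
-- one loop-body step of B: process index i into the running model_dict
def pvStepB (str_combi : List String) (cat_num : Int) (STOP_WORDS : List String) (md : List (Int × List (String × Int))) (i : Int) : List (Int × List (String × Int)) :=
  match PySem.List.pyGet? str_combi i with
  | none => md
  | some word =>
    if ¬ (word ∈ STOP_WORDS) ∧ PySem.Str.strIsdigit word = false then
      match (PySem.Dict.mk md).get? cat_num with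
      | none => md
      | some counts =>
        ((PySem.Dict.mk md).insert cat_num ((PySem.Dict.mk counts).insert word ((PySem.Dict.mk counts).getD word 0 + 1)).items).items
    else md

def trainBagOfWordsModel_alt (str_combi : List String) (x : Int) (model_dict : List (Int × List (String × Int))) (cat_num : Int) (STOP_WORDS : List String) : List (Int × List (String × Int)) :=
  (PySem.List.pyRange x (str_combi.length : Int) 1).foldl (pvStepB str_combi cat_num STOP_WORDS) model_dict

-- ===== PRECONDITION & SPEC =====
-- Pre_ excludes exactly the inputs where A raises: x < -len(str_combi) with x < len (IndexError on
-- str_combi[x]), and cat_num missing from model_dict while some visited word passes the guard (KeyError).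
def Pre_trainBagOfWordsModel (str_combi : List String) (x : Int) (model_dict : List (Int × List (String × Int))) (cat_num : Int) (STOP_WORDS : List String) : Prop :=
  (str_combi.length : Int) ≤ x ∨
  (-(str_combi.length : Int) ≤ x ∧
    (cat_num ∈ model_dict.map Prod.fst ∨
      ∀ w ∈ (PySem.List.pyRange x (str_combi.length : Int) 1).filterMap (fun i => PySem.List.pyGet? str_combi i),
        w ∈ STOP_WORDS ∨ PySem.Str.strIsdigit w = true))
instance (str_combi : List String) (x : Int) (model_dict : List (Int × List (String × Int))) (cat_num : Int) (STOP_WORDS : List String) : Decidable (Pre_trainBagOfWordsModel str_combi x model_dict cat_num STOP_WORDS) := by unfold Pre_trainBagOfWordsModel; infer_instance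

def pvWitness_trainBagOfWordsModel : List String × Int × (List (Int × List (String × Int))) × Int × List String :=
  (["cat", "the", "7", "cat"], 0, [(0, [("dog", 2)])], 0, ["the"])
def Spec_trainBagOfWordsModel (str_combi : List String) (x : Int) (model_dict : List (Int × List (String × Int))) (cat_num : Int) (STOP_WORDS : List String) (out : List (Int × List (String × Int))) : Prop := out = trainBagOfWordsModel_alt str_combi x model_dict cat_num STOP_WORDS
instance (str_combi : List String) (x : Int) (model_dict : List (Int × List (String × Int))) (cat_num : Int) (STOP_WORDS : List String) (out : List (Int × List (String × Int))) : Decidable (Spec_trainBagOfWordsModel str_combi x model_dict cat_num STOP_WORDS out) := by unfold Spec_trainBagOfWordsModel; infer_instance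

-- ===== CLAIM (what is proved, stated in full; the proofs are below) =====
def Claim_equal_trainBagOfWordsModel : Prop := ∀ (str_combi : List String) (x : Int) (model_dict : List (Int × List (String × Int))) (cat_num : Int) (STOP_WORDS : List String), Dom_trainBagOfWordsModel str_combi x model_dict cat_num STOP_WORDS → Pre_trainBagOfWordsModel str_combi x model_dict cat_num STOP_WORDS → Spec_trainBagOfWordsModel str_combi x model_dict cat_num STOP_WORDS (trainBagOfWordsModel str_combi x model_dict cat_num STOP_WORDS)

-- ===== LEMMAS AND PROOFS =====
theorem inner_eq (inner : List (String × Int)) (w : String) :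
  (if (PySem.Dict.mk inner).contains w then (PySem.Dict.mk inner).modify w 0 (· + 1) else (PySem.Dict.mk inner).insert w 1)
  = (PySem.Dict.mk inner).insert w ((PySem.Dict.mk inner).getD w 0 + 1) := by
  by_cases h : (PySem.Dict.mk inner).contains w = true
  · rw [if_pos h]; rfl
  · have h' : (PySem.Dict.mk inner).contains w = false := Bool.of_not_eq_true h
    rw [if_neg h, PySem.Dict.getD_of_not_contains _ _ h']
    norm_num

theorem main_eq (str_combi : List String) (cat_num : Int) (STOP_WORDS : List String) :
  ∀ (n : Nat) (x : Int) (md : List (Int × List (String × Int))),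
    ((str_combi.length : Int) - x).toNat = n →
    -(str_combi.length : Int) ≤ x →
    (cat_num ∈ md.map Prod.fst ∨
      ∀ w ∈ (PySem.List.pyRange x (str_combi.length : Int) 1).filterMap (fun i => PySem.List.pyGet? str_combi i),
        w ∈ STOP_WORDS ∨ PySem.Str.strIsdigit w = true) →
    trainBagOfWordsModel str_combi x md cat_num STOP_WORDS
      = (PySem.List.pyRange x (str_combi.length : Int) 1).foldl (pvStepB str_combi cat_num STOP_WORDS) md := by
  intro n
  induction n with
  | zero =>
    intro x md hn hlow hinv
    have hx : (str_combi.length : Int) ≤ x := by omega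
    rw [trainBagOfWordsModel, PySem.List.pyRange_one_eq_nil hx]
    simp [hx]
  | succ m ih =>
    intro x md hn hlow hinv
    have hx : x < (str_combi.length : Int) := by omega
    obtain ⟨w, hw⟩ : ∃ w, PySem.List.pyGet? str_combi x = some w := by
      cases hget : PySem.List.pyGet? str_combi x with
      | none =>
        exfalso
        exact ((PySem.List.pyGet?_eq_none_iff _ _).mp hget) (by simp [PySem.Raise.InRange]; omega)
      | some w => exact ⟨w, rfl⟩
    rw [PySem.List.pyRange_one_cons hx, List.foldl_cons, trainBagOfWordsModel]
    simp only [not_le.mpr hx, if_false, hw]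
    by_cases g : ¬ (w ∈ STOP_WORDS) ∧ PySem.Str.strIsdigit w = false
    · have hkey : cat_num ∈ md.map Prod.fst := by
        rcases hinv with h | h
        · exact h
        · exfalso
          have hwmem : w ∈ (PySem.List.pyRange x (str_combi.length : Int) 1).filterMap (fun i => PySem.List.pyGet? str_combi i) := by
            refine List.mem_filterMap.mpr ⟨x, ?_, hw⟩
            rw [PySem.List.pyRange_one_cons hx]; exact List.mem_cons_self
          rcases h w hwmem with hs | hd
          · exact g.1 hs
          · rw [g.2] at hd; exact Bool.false_ne_true hd
      obtain ⟨inner, hin⟩ : ∃ inner, (PySem.Dict.mk md).get? cat_num = some inner := by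
        cases hget : (PySem.Dict.mk md).get? cat_num with
        | none =>
          exfalso
          have hc : (PySem.Dict.mk md).contains cat_num = false :=
            (PySem.Dict.get?_eq_none_iff_contains _ _).mp hget
          have hm : cat_num ∈ (PySem.Dict.mk md).keys := by
            simp only [PySem.Dict.keys]; exact hkey
          have := (PySem.Dict.contains_iff_mem_keys _ _).mpr hm
          rw [hc] at this; exact Bool.false_ne_true this
        | some inner => exact ⟨inner, rfl⟩
      simp only [if_pos g, hin]
      have hstep : pvStepB str_combi cat_num STOP_WORDS md x
          = ((PySem.Dict.mk md).insert cat_num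
              (if (PySem.Dict.mk inner).contains w then (PySem.Dict.mk inner).modify w 0 (· + 1)
               else (PySem.Dict.mk inner).insert w 1).items).items := by
        simp only [pvStepB, hw, if_pos g, hin, inner_eq]
      rw [hstep]
      apply ih
      · omega
      · omega
      · left
        have : (((PySem.Dict.mk md).insert cat_num
            (if (PySem.Dict.mk inner).contains w then (PySem.Dict.mk inner).modify w 0 (· + 1)
             else (PySem.Dict.mk inner).insert w 1).items).items).map Prod.fst
            = ((PySem.Dict.mk md).insert cat_num _).keys := rfl
        rw [this]
        exact (PySem.Dict.mem_keys_insert _ _ _ _).mpr (Or.inl rfl)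
    · simp only [if_neg g]
      have hstep : pvStepB str_combi cat_num STOP_WORDS md x = md := by
        simp only [pvStepB, hw, if_neg g]
      rw [hstep]
      apply ih
      · omega
      · omega
      · rcases hinv with h | h
        · exact Or.inl h
        · right
          intro w' hw'
          apply h
          rw [PySem.List.pyRange_one_cons hx, List.filterMap_cons, hw]
          exact List.mem_cons_of_mem _ hw'

-- ===== VERDICT (by name: the statement is the Claim_ definition above) =====
theorem trainBagOfWordsModel_spec : Claim_equal_trainBagOfWordsModel := by
  intro sc x md cn sw _ hpre
  unfold Spec_trainBagOfWordsModel trainBagOfWordsModel_alt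
  refine main_eq sc cn sw _ x md rfl ?_ ?_
  · rcases hpre with h | ⟨h1, _⟩
    · have : (0:Int) ≤ (sc.length : Int) := Int.natCast_nonneg _
      omega
    · exact h1
  · rcases hpre with h | ⟨_, h2⟩
    · right; rw [PySem.List.pyRange_one_eq_nil h]; simp
    · exact h2
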